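-- pv_equiv track=rewrite | github.com/datasciencecampus/pygrams | scripts/utils/utils.py | fill_missing_zeros
-- ===== SOURCE A (Python) =====
-- def fill_missing_zeros(quarterly_values, non_zero_dates, all_quarters):
--     for idx, period in enumerate(all_quarters):
--         if idx >= len(non_zero_dates):
--             non_zero_dates.append(period)
--             quarterly_values.append(0)
--         elif period == non_zero_dates[idx]:
--             continue
--         else:
--             non_zero_dates.insert(idx, period)
--             quarterly_values.insert(idx, 0)
--     return non_zero_dates, quarterly_values
-- ===== SOURCE B (Python) =====
-- def fill_missing_zeros(quarterly_values, non_zero_dates, all_quarters):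
--     # Single forward pass with pointers; A mutates its arguments in place,
--     # B builds fresh lists (return-value equivalence only).
--     i = 0  # pointer into non_zero_dates (dates already matched)
--     j = 0  # pointer into quarterly_values (values already shifted past)
--     vals_prefix = []
--     tail_zeros = 0
--     for period in all_quarters:
--         if i >= len(non_zero_dates):
--             tail_zeros += 1
--         elif period == non_zero_dates[i]:
--             i += 1
--             if j < len(quarterly_values):
--                 vals_prefix.append(quarterly_values[j])
--                 j += 1
--         else:
--             vals_prefix.append(0)
--     dates = list(all_quarters) + non_zero_dates[i:]
--     values = vals_prefix + quarterly_values[j:] + [0] * tail_zeros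
--     return dates, values
-- ===== Notes on version B (the rewrite author's own statement) =====
-- stated objective: faster
-- what changed: Replaced A's in-place loop with quadratic list.insert shifting by a single forward pass with two pointers into non_zero_dates and quarterly_values that builds fresh output lists and appends the leftover tails plus trailing zeros.
import Mathlib
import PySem

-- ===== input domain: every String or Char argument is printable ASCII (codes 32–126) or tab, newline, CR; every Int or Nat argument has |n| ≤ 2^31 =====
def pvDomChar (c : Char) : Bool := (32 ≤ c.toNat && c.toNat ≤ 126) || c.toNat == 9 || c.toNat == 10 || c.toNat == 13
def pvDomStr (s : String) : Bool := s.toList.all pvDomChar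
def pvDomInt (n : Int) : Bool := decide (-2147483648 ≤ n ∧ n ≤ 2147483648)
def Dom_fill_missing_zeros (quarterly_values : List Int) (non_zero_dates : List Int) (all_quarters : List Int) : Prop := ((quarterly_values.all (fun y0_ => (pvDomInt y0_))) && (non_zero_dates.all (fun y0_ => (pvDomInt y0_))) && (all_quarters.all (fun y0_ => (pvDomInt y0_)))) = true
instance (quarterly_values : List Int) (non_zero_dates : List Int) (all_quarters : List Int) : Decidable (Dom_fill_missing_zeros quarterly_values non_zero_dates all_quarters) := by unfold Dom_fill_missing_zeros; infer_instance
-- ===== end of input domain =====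

-- B replaces A's quadratic list.insert loop by one forward pass with two pointers,
-- building fresh lists (A mutates its arguments in place; the equivalence is about the return value).

-- ===== PORT A =====
-- loop body of A: state = (non_zero_dates, quarterly_values), p = (idx, period)
def pvStepA (st : List Int × List Int) (p : Int × Int) : List Int × List Int :=
  if (st.1.length : Int) ≤ p.1 then (st.1 ++ [p.2], st.2 ++ [0])
  else if PySem.List.pyGet? st.1 p.1 = some p.2 then st
  else (PySem.List.insert st.1 p.1 p.2, PySem.List.insert st.2 p.1 0)

def fill_missing_zeros (quarterly_values : List Int) (non_zero_dates : List Int) (all_quarters : List Int) : List Int × List Int :=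
  let st := (PySem.List.enumerate all_quarters).foldl pvStepA (non_zero_dates, quarterly_values)
  (st.1, st.2)

-- ===== PORT B =====
-- loop body of B: state = (i, j, vals_prefix, tail_zeros)
def pvStepB (quarterly_values : List Int) (non_zero_dates : List Int)
    (st : Nat × Nat × List Int × Nat) (period : Int) : Nat × Nat × List Int × Nat :=
  if non_zero_dates.length ≤ st.1 then (st.1, st.2.1, st.2.2.1, st.2.2.2 + 1)
  else if period = non_zero_dates.getD st.1 0 then
    (if st.2.1 < quarterly_values.length then
      (st.1 + 1, st.2.1 + 1, st.2.2.1 ++ [quarterly_values.getD st.2.1 0], st.2.2.2)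
    else (st.1 + 1, st.2.1, st.2.2.1, st.2.2.2))
  else (st.1, st.2.1, st.2.2.1 ++ [0], st.2.2.2)

def fill_missing_zeros_alt (quarterly_values : List Int) (non_zero_dates : List Int) (all_quarters : List Int) : List Int × List Int :=
  let st := all_quarters.foldl (pvStepB quarterly_values non_zero_dates) (0, 0, [], 0)
  -- non_zero_dates[i:] and quarterly_values[j:] with 0 ≤ pointer are List.drop; [0]*tail_zeros is replicate
  (all_quarters ++ non_zero_dates.drop st.1,
   st.2.2.1 ++ quarterly_values.drop st.2.1 ++ List.replicate st.2.2.2 0)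

-- ===== PRECONDITION & SPEC =====
def Spec_fill_missing_zeros (quarterly_values : List Int) (non_zero_dates : List Int) (all_quarters : List Int) (out : List Int × List Int) : Prop := out = fill_missing_zeros_alt quarterly_values non_zero_dates all_quarters
instance (quarterly_values : List Int) (non_zero_dates : List Int) (all_quarters : List Int) (out : List Int × List Int) : Decidable (Spec_fill_missing_zeros quarterly_values non_zero_dates all_quarters out) := by unfold Spec_fill_missing_zeros; infer_instance

-- ===== CLAIM (what is proved, stated in full; the proofs are below) =====
def Claim_equal_fill_missing_zeros : Prop := ∀ (quarterly_values : List Int) (non_zero_dates : List Int) (all_quarters : List Int), Dom_fill_missing_zeros quarterly_values non_zero_dates all_quarters → Spec_fill_missing_zeros quarterly_values non_zero_dates all_quarters (fill_missing_zeros quarterly_values non_zero_dates all_quarters)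

-- ===== LEMMAS AND PROOFS =====

-- Python list.insert clamps an index past the end: it appends.
lemma pv_insert_ge (xs : List Int) (p : Nat) (v : Int) (h : xs.length ≤ p) :
    PySem.List.insert xs (p : Int) v = xs ++ [v] := by
  simp only [PySem.List.insert, PySem.List.sliceIndices, Int.reduceLT, ↓reduceIte]
  rw [if_neg (by omega), min_eq_right (by exact_mod_cast h)]
  simp

-- Main invariant: A's fold state stays (pref ++ dates-tail, vals-prefix ++ values-tail ++ zeros)
-- driven by B's pointer state.
lemma pv_fold_rel (quarterly_values non_zero_dates : List Int) :
    ∀ (aq pref : List Int) (i j tz : Nat) (vp : List Int),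
      i ≤ non_zero_dates.length → j ≤ quarterly_values.length →
      (tz ≠ 0 → i = non_zero_dates.length) →
      vp.length ≤ pref.length →
      (tz = 0 → vp.length < pref.length → j = quarterly_values.length) →
      (PySem.List.enumerate aq (pref.length : Int)).foldl pvStepA
        (pref ++ non_zero_dates.drop i,
         vp ++ quarterly_values.drop j ++ List.replicate tz 0)
      = (let st := aq.foldl (pvStepB quarterly_values non_zero_dates) (i, j, vp, tz)
         ((pref ++ aq) ++ non_zero_dates.drop st.1,
          st.2.2.1 ++ quarterly_values.drop st.2.1 ++ List.replicate st.2.2.2 0)) := by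
  intro aq
  induction aq with
  | nil => intro pref i j tz vp _ _ _ _ _; simp [PySem.List.enumerate]
  | cons period aq ih =>
    intro pref i j tz vp hi hj htz hvp hvj
    rw [PySem.List.enumerate_cons]
    simp only [List.foldl_cons]
    by_cases hie : i = non_zero_dates.length
    · -- dates tail exhausted: A appends, B counts a tail zero
      subst hie
      rw [List.drop_length, List.append_nil]
      have hA : pvStepA (pref, vp ++ quarterly_values.drop j ++ List.replicate tz 0)
            ((pref.length : Int), period)
          = (pref ++ [period], vp ++ quarterly_values.drop j ++ List.replicate (tz + 1) 0) := by
        simp [pvStepA, List.replicate_succ', List.append_assoc]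
      rw [hA]
      have hB : pvStepB quarterly_values non_zero_dates
            (non_zero_dates.length, j, vp, tz) period
          = (non_zero_dates.length, j, vp, tz + 1) := by
        simp [pvStepB]
      rw [hB]
      have := ih (pref ++ [period]) non_zero_dates.length j (tz + 1) vp le_rfl hj
        (fun _ => rfl) (by simp; omega) (by simp)
      simpa [List.append_assoc] using this
    · have hilt : i < non_zero_dates.length := lt_of_le_of_ne hi hie
      have htz0 : tz = 0 := by by_contra h; exact hie (htz h)
      subst htz0
      rw [List.replicate_zero, List.append_nil] at *
      have hlen : ¬ (((pref ++ non_zero_dates.drop i).length : Int) ≤ (pref.length : Int)) := by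
        simp [List.length_append, List.length_drop]; omega
      have hget : PySem.List.pyGet? (pref ++ non_zero_dates.drop i) (pref.length : Int)
          = some (non_zero_dates[i]'hilt) := by
        rw [PySem.List.pyGet?_natCast, List.getElem?_append_right le_rfl]
        simp [List.getElem?_drop, List.getElem?_eq_getElem hilt]
      have hgdi : non_zero_dates.getD i 0 = non_zero_dates[i]'hilt :=
        List.getD_eq_getElem _ _ hilt
      by_cases hmatch : non_zero_dates[i]'hilt = period
      · -- match: A keeps the element, B consumes one date (and one value if any)
        have hdrop : non_zero_dates.drop i = period :: non_zero_dates.drop (i + 1) := by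
          rw [List.drop_eq_getElem_cons hilt, hmatch]
        have hA : pvStepA (pref ++ non_zero_dates.drop i, vp ++ quarterly_values.drop j)
              ((pref.length : Int), period)
            = (pref ++ non_zero_dates.drop i, vp ++ quarterly_values.drop j) := by
          simp only [pvStepA]
          rw [if_neg hlen, if_pos (by rw [hget, hmatch])]
        rw [hA]
        by_cases hjlt : j < quarterly_values.length
        · have hvdrop : quarterly_values.drop j
              = quarterly_values.getD j 0 :: quarterly_values.drop (j + 1) := by
            rw [List.drop_eq_getElem_cons hjlt, List.getD_eq_getElem _ _ hjlt]
          have hB : pvStepB quarterly_values non_zero_dates (i, j, vp, 0) period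
              = (i + 1, j + 1, vp ++ [quarterly_values.getD j 0], 0) := by
            simp only [pvStepB]
            rw [if_neg (Nat.not_le.mpr hilt), if_pos (by rw [hgdi, hmatch]), if_pos hjlt]
          rw [hB]
          have := ih (pref ++ [period]) (i + 1) (j + 1) 0
            (vp ++ [quarterly_values.getD j 0]) hilt hjlt
            (by simp) (by simp; omega)
            (by intro _ hlt; simp at hlt
                exact absurd (hvj rfl (by omega)) (by omega))
          simp only [List.replicate_zero, List.append_nil, List.length_append,
            List.length_singleton, Nat.cast_add, Nat.cast_one] at this ⊢
          rw [hdrop, hvdrop]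
          simpa [List.append_assoc] using this
        · have hj' : j = quarterly_values.length := by omega
          have hB : pvStepB quarterly_values non_zero_dates (i, j, vp, 0) period
              = (i + 1, j, vp, 0) := by
            simp only [pvStepB]
            rw [if_neg (Nat.not_le.mpr hilt), if_pos (by rw [hgdi, hmatch]), if_neg hjlt]
          rw [hB]
          have := ih (pref ++ [period]) (i + 1) j 0 vp hilt hj
            (by simp) (by simp; omega) (fun _ _ => hj')
          simp only [List.replicate_zero, List.append_nil, List.length_append,
            List.length_singleton, Nat.cast_add, Nat.cast_one] at this ⊢
          rw [hdrop]
          simpa [List.append_assoc] using this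
      · -- mismatch: A inserts period and a zero at idx, B appends 0 to the prefix
        have hAdates : PySem.List.insert (pref ++ non_zero_dates.drop i)
              ((pref.length : Int)) period
            = (pref ++ [period]) ++ non_zero_dates.drop i := by
          rw [PySem.List.insert_natCast _ _ _ (by simp),
            List.take_left' rfl, List.drop_left' rfl]
          simp
        have hAvals : PySem.List.insert (vp ++ quarterly_values.drop j)
              ((pref.length : Int)) 0
            = (vp ++ [0]) ++ quarterly_values.drop j := by
          rcases lt_or_eq_of_le hvp with hlt | heq
          · have hj' : j = quarterly_values.length := hvj rfl hlt
            rw [hj', List.drop_length, List.append_nil,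
              pv_insert_ge _ _ _ (by omega)]
            simp
          · rw [PySem.List.insert_natCast _ _ _ (by simp [← heq]),
              List.take_left' heq, List.drop_left' heq]
            simp
        have hA : pvStepA (pref ++ non_zero_dates.drop i, vp ++ quarterly_values.drop j)
              ((pref.length : Int), period)
            = ((pref ++ [period]) ++ non_zero_dates.drop i,
               (vp ++ [0]) ++ quarterly_values.drop j) := by
          simp only [pvStepA]
          rw [if_neg hlen, if_neg (by rw [hget]; simp [hmatch])]
          rw [hAdates, hAvals]
        rw [hA]
        have hB : pvStepB quarterly_values non_zero_dates (i, j, vp, 0) period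
            = (i, j, vp ++ [0], 0) := by
          simp only [pvStepB]
          rw [if_neg (Nat.not_le.mpr hilt),
            if_neg (by rw [hgdi]; exact fun h => hmatch h.symm)]
        rw [hB]
        have := ih (pref ++ [period]) i j 0 (vp ++ [0]) hi hj
          (by simp) (by simp; omega)
          (by intro _ hlt; simp at hlt; exact hvj rfl (by omega))
        simp only [List.replicate_zero, List.append_nil, List.length_append,
          List.length_singleton, Nat.cast_add, Nat.cast_one] at this ⊢
        simpa [List.append_assoc] using this

-- ===== VERDICT (by name: the statement is the Claim_ definition above) =====
theorem fill_missing_zeros_spec : Claim_equal_fill_missing_zeros := by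
  intro qv nz aq _
  unfold Spec_fill_missing_zeros fill_missing_zeros fill_missing_zeros_alt
  have h := pv_fold_rel qv nz aq [] 0 0 0 [] (by simp) (by simp) (by simp) (by simp) (by simp)
  simp only [List.length_nil, Nat.cast_zero, List.nil_append, List.drop_zero,
    List.replicate_zero, List.append_nil] at h
  simp only [h]
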